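-- pv_equiv track=rewrite | github.com/MiguelR90/katas | leetcode/medium-1208-get-equal-str-within-budget.py | num_eq_substr
-- ===== SOURCE A (Python) =====
-- def compute_ascii_distance(a: str, b: str) -> int:
--     return abs(ord(a) - ord(b))
--
-- def num_eq_substr(s: str, t: str, maxcost: int) -> int:
--     longest: int = 0
--     left: int = 0
--     cost: int = 0
--
--     for right in range(len(s)):
--         cost += compute_ascii_distance(s[right], t[right])
--
--         while cost > maxcost:
--             cost -= compute_ascii_distance(s[left], t[left])
--             left += 1
--
--         longest = max(longest, right - left + 1)
--
--     return longest
-- ===== SOURCE B (Python) =====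
-- def num_eq_substr(s: str, t: str, maxcost: int) -> int:
--     n = len(s)
--     # prefix sums of per-position ascii distances
--     P = [0]
--     for i in range(n):
--         P.append(P[i] + abs(ord(s[i]) - ord(t[i])))
--     best = 0
--     for right in range(n):
--         # least left with P[left] >= P[right+1] - maxcost, by binary search
--         x = P[right + 1] - maxcost
--         lo, hi = 0, len(P)
--         while lo < hi:
--             mid = (lo + hi) // 2
--             if P[mid] < x:
--                 lo = mid + 1
--             else:
--                 hi = mid
--         best = max(best, right + 1 - lo)
--     return best
-- ===== Notes on version B (the rewrite author's own statement) =====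
-- stated objective: alternative
-- what changed: Replaces A's amortized two-pointer sliding window by a prefix-sum array plus a hand-written binary search that, for each right end, finds the smallest admissible left end directly.
import Mathlib
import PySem

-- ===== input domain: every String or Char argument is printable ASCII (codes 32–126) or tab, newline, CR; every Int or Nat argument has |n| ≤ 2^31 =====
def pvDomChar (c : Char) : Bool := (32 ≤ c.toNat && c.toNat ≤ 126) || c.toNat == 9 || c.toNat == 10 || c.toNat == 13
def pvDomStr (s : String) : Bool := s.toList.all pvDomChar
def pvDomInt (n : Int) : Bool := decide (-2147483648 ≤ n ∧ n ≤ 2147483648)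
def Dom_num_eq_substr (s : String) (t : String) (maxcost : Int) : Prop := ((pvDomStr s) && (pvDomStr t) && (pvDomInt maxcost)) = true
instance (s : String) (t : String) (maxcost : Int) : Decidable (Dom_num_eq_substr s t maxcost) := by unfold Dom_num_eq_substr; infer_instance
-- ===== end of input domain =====

-- B replaces A's two-pointer sliding window by prefix sums plus a per-right binary search
-- (alternative algorithm, similar cost); equivalence is about the return value only.

-- ===== PORT A =====
-- helper compute_ascii_distance of A
def compute_ascii_distance (a : Char) (b : Char) : Int := |(a.toNat : Int) - (b.toNat : Int)|

-- the inner `while cost > maxcost` loop; fuel = right + 1 - left suffices on Pre_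
-- (with maxcost ≥ 0 Python's left never passes right + 1, since cost = 0 there)
def pvInnerA (d : Nat → Int) (maxcost : Int) : Nat → Int → Nat → Int × Nat
  | 0, cost, left => (cost, left)
  | fuel + 1, cost, left =>
    if maxcost < cost then pvInnerA d maxcost fuel (cost - d left) (left + 1)
    else (cost, left)

-- one iteration of A's `for right in range(len(s))` loop; state = (longest, cost, left)
def pvStepA (d : Nat → Int) (maxcost : Int) (st : Int × Int × Nat) (right : Nat) : Int × Int × Nat :=
  let cost := st.2.1 + d right
  let res := pvInnerA d maxcost (right + 1 - st.2.2) cost st.2.2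
  (max st.1 ((right : Int) - (res.2 : Int) + 1), res.1, res.2)

def num_eq_substr (s : String) (t : String) (maxcost : Int) : Int :=
  let sl := s.toList
  let tl := t.toList
  -- s[i]/t[i]: indices are in range on Pre_, so plain getD is exact there
  let d := fun i => compute_ascii_distance (sl.getD i ' ') (tl.getD i ' ')
  ((List.range sl.length).foldl (pvStepA d maxcost) (0, 0, 0)).1

-- ===== PORT B =====
-- per-position ascii distance, as Source B inlines it
def pvDistB (sl : List Char) (tl : List Char) (i : Nat) : Int :=
  |((sl.getD i ' ').toNat : Int) - ((tl.getD i ' ').toNat : Int)|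

-- one iteration of Source B's prefix-sum building loop
def pvStepP (sl : List Char) (tl : List Char) (acc : List Int) (i : Nat) : List Int :=
  acc ++ [acc.getD i 0 + pvDistB sl tl i]

-- Source B's hand-written `while lo < hi` binary search; fuel = len(P) suffices
def pvBisect (P : List Int) (x : Int) : Nat → Nat → Nat → Nat
  | 0, lo, _ => lo
  | fuel + 1, lo, hi =>
    if lo < hi then
      let mid := (lo + hi) / 2
      if P.getD mid 0 < x then pvBisect P x fuel (mid + 1) hi
      else pvBisect P x fuel lo mid
    else lo

-- one iteration of Source B's `for right in range(n)` loop
def pvStepB (P : List Int) (maxcost : Int) (best : Int) (right : Nat) : Int :=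
  let x := P.getD (right + 1) 0 - maxcost
  let lo := pvBisect P x P.length 0 P.length
  max best ((right : Int) + 1 - (lo : Int))

def num_eq_substr_alt (s : String) (t : String) (maxcost : Int) : Int :=
  let sl := s.toList
  let tl := t.toList
  let n := sl.length
  let P := (List.range n).foldl (pvStepP sl tl) [0]
  (List.range n).foldl (pvStepB P maxcost) 0

-- ===== PRECONDITION & SPEC =====
-- Pre_ excludes exactly the inputs where Python A raises IndexError: t shorter than s
-- (t[right] out of range), and negative maxcost with nonempty s (the while loop drives
-- left past the end of s, since no window cost can drop below 0).
def Pre_num_eq_substr (s : String) (t : String) (maxcost : Int) : Prop :=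
  s.length ≤ t.length ∧ (0 ≤ maxcost ∨ s = "")
instance (s : String) (t : String) (maxcost : Int) : Decidable (Pre_num_eq_substr s t maxcost) := by unfold Pre_num_eq_substr; infer_instance

def pvWitness_num_eq_substr : String × String × Int := ("abcd", "acde", 3)

def Spec_num_eq_substr (s : String) (t : String) (maxcost : Int) (out : Int) : Prop := out = num_eq_substr_alt s t maxcost
instance (s : String) (t : String) (maxcost : Int) (out : Int) : Decidable (Spec_num_eq_substr s t maxcost out) := by unfold Spec_num_eq_substr; infer_instance

-- ===== CLAIM (what is proved, stated in full; the proofs are below) =====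
def Claim_equal_num_eq_substr : Prop := ∀ (s : String) (t : String) (maxcost : Int), Dom_num_eq_substr s t maxcost → Pre_num_eq_substr s t maxcost → Spec_num_eq_substr s t maxcost (num_eq_substr s t maxcost)

-- ===== LEMMAS AND PROOFS =====

-- prefix sums of the distance sequence
def Psum (d : Nat → Int) : Nat → Int
  | 0 => 0
  | n + 1 => Psum d n + d n

theorem Psum_mono (d : Nat → Int) (hd : ∀ i, 0 ≤ d i) {i j : Nat} (h : i ≤ j) :
    Psum d i ≤ Psum d j := by
  induction j with
  | zero => simp [Nat.le_zero.mp h]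
  | succ j ih =>
    rcases Nat.lt_or_ge i (j + 1) with hlt | hge
    · have := ih (Nat.lt_succ_iff.mp hlt)
      have := hd j
      simp only [Psum]; linarith
    · have : i = j + 1 := le_antisymm h hge
      simp [this]

theorem exF (d : Nat → Int) (mc : Int) (hm : 0 ≤ mc) (r : Nat) :
    ∃ l, Psum d r - Psum d l ≤ mc := ⟨r, by simpa using hm⟩

-- the least admissible left end for window ending before r (A's left pointer target)
def Fdef (d : Nat → Int) (mc : Int) (hm : 0 ≤ mc) (r : Nat) : Nat := Nat.find (exF d mc hm r)

theorem F_le (d : Nat → Int) (mc : Int) (hm : 0 ≤ mc) (r : Nat) : Fdef d mc hm r ≤ r :=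
  Nat.find_le (by simpa using hm)

theorem F_spec (d : Nat → Int) (mc : Int) (hm : 0 ≤ mc) (r : Nat) :
    Psum d r - Psum d (Fdef d mc hm r) ≤ mc := Nat.find_spec (exF d mc hm r)

theorem F_min (d : Nat → Int) (mc : Int) (hm : 0 ≤ mc) (r : Nat) {l : Nat}
    (h : l < Fdef d mc hm r) : mc < Psum d r - Psum d l := by
  have := Nat.find_min (exF d mc hm r) h
  omega

theorem F_mono (d : Nat → Int) (hd : ∀ i, 0 ≤ d i) (mc : Int) (hm : 0 ≤ mc) (r : Nat) :
    Fdef d mc hm r ≤ Fdef d mc hm (r + 1) := by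
  apply Nat.find_le
  have h1 : Psum d r ≤ Psum d (r + 1) := Psum_mono d hd (Nat.le_succ r)
  have h2 := F_spec d mc hm (r + 1)
  linarith

theorem F_zero (d : Nat → Int) (mc : Int) (hm : 0 ≤ mc) : Fdef d mc hm 0 = 0 := by
  unfold Fdef
  rw [Nat.find_eq_zero]
  simpa using hm

theorem innerA_stop (d : Nat → Int) (mc : Int) (cost : Int) (left : Nat)
    (h : ¬ mc < cost) : ∀ fuel, pvInnerA d mc fuel cost left = (cost, left) := by
  intro fuel; cases fuel <;> simp [pvInnerA, h]

theorem innerA_eq (d : Nat → Int) (mc : Int) (hm : 0 ≤ mc) (r : Nat) :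
    ∀ m left, left ≤ Fdef d mc hm (r + 1) → Fdef d mc hm (r + 1) ≤ r + 1 →
      Fdef d mc hm (r + 1) - left = m →
      pvInnerA d mc (r + 1 - left) (Psum d (r + 1) - Psum d left) left =
        (Psum d (r + 1) - Psum d (Fdef d mc hm (r + 1)), Fdef d mc hm (r + 1)) := by
  intro m
  induction m with
  | zero =>
    intro left hle _ hsub
    have heq : left = Fdef d mc hm (r + 1) := by omega
    subst heq
    have := F_spec d mc hm (r + 1)
    exact innerA_stop d mc _ _ (by omega) _
  | succ m ih =>
    intro left hle hF hsub
    have hlt : left < Fdef d mc hm (r + 1) := by omega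
    have hcost : mc < Psum d (r + 1) - Psum d left := F_min d mc hm (r + 1) hlt
    have hfuel : r + 1 - left = (r - left) + 1 := by omega
    rw [hfuel]
    simp only [pvInnerA, if_pos hcost]
    have hstep : Psum d (r + 1) - Psum d left - d left = Psum d (r + 1) - Psum d (left + 1) := by
      simp [Psum]; ring
    rw [hstep]
    have hfuel2 : r - left = r + 1 - (left + 1) := by omega
    rw [hfuel2]
    exact ih (left + 1) (by omega) hF (by omega)

theorem A_loop (d : Nat → Int) (hd : ∀ i, 0 ≤ d i) (mc : Int) (hm : 0 ≤ mc) :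
    ∀ k, (List.range k).foldl (pvStepA d mc) (0, 0, 0) =
      ((List.range k).foldl (fun b (r : Nat) => max b ((r : Int) + 1 - (↑(Fdef d mc hm (r + 1)) : Int))) 0,
        Psum d k - Psum d (Fdef d mc hm k), Fdef d mc hm k) := by
  intro k
  induction k with
  | zero => simp [Psum, F_zero d mc hm]
  | succ k ih =>
    rw [List.range_succ, List.foldl_append, List.foldl_append, ih]
    simp only [List.foldl_cons, List.foldl_nil]
    unfold pvStepA
    have hc : Psum d k - Psum d (Fdef d mc hm k) + d k
        = Psum d (k + 1) - Psum d (Fdef d mc hm k) := by simp [Psum]; ring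
    simp only []
    rw [hc]
    rw [innerA_eq d mc hm k (Fdef d mc hm (k+1) - Fdef d mc hm k) (Fdef d mc hm k)
      (F_mono d hd mc hm k) (F_le d mc hm (k+1)) rfl]
    have : (k : Int) - (Fdef d mc hm (k+1) : Int) + 1
        = (k : Int) + 1 - (Fdef d mc hm (k+1) : Int) := by ring
    rw [this]

theorem getD_map_range (f : Nat → Int) (k i : Nat) (h : i < k) :
    ((List.range k).map f).getD i 0 = f i := by
  rw [List.getD_eq_getElem _ _ (by simpa using h)]
  simp

theorem P_build (sl tl : List Char) :
    ∀ k, (List.range k).foldl (pvStepP sl tl) [0] = (List.range (k + 1)).map (Psum (pvDistB sl tl)) := by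
  intro k
  induction k with
  | zero => simp [Psum]
  | succ k ih =>
    rw [List.range_succ, List.foldl_append, ih]
    simp only [List.foldl_cons, List.foldl_nil]
    unfold pvStepP
    rw [getD_map_range _ _ _ (by omega)]
    rw [List.range_succ (n := k + 1), List.map_append]
    simp [Psum]

theorem bisect_eq (P : List Int) (x : Int) (lstar : Nat)
    (hhigh : x ≤ P.getD lstar 0)
    (hlow : ∀ i, i < lstar → P.getD i 0 < x)
    (hmono : ∀ i j, i ≤ j → j < P.length → P.getD i 0 ≤ P.getD j 0) :
    ∀ fuel lo hi, hi ≤ P.length → lo ≤ lstar → lstar ≤ hi → hi - lo ≤ fuel →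
      pvBisect P x fuel lo hi = lstar := by
  intro fuel
  induction fuel with
  | zero => intro lo hi _ h1 h2 h3; simp [pvBisect]; omega
  | succ fuel ih =>
    intro lo hi hhi h1 h2 h3
    by_cases hlh : lo < hi
    · simp only [pvBisect, if_pos hlh]
      set mid := (lo + hi) / 2 with hmid
      have hb1 : lo ≤ mid := by omega
      have hb2 : mid < hi := by omega
      by_cases hcmp : P.getD mid 0 < x
      · rw [if_pos hcmp]
        have hml : mid < lstar := by
          by_contra hcon
          have : P.getD lstar 0 ≤ P.getD mid 0 := hmono _ _ (by omega) (by omega)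
          linarith
        exact ih (mid + 1) hi hhi (by omega) h2 (by omega)
      · rw [if_neg hcmp]
        have hml : lstar ≤ mid := by
          by_contra hcon
          exact hcmp (hlow mid (by omega))
        exact ih lo mid (by omega) h1 hml (by omega)
    · simp only [pvBisect, if_neg hlh]
      omega

theorem B_loop (d : Nat → Int) (hd : ∀ i, 0 ≤ d i) (mc : Int) (hm : 0 ≤ mc) (n : Nat) :
    (List.range n).foldl (pvStepB ((List.range (n + 1)).map (Psum d)) mc) 0 =
      (List.range n).foldl (fun b (r : Nat) => max b ((r : Int) + 1 - (↑(Fdef d mc hm (r + 1)) : Int))) 0 := by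
  apply PySem.List.foldl_congr_mem
  intro b r hr
  have hrn : r < n := List.mem_range.mp hr
  unfold pvStepB
  dsimp only
  set P := (List.range (n + 1)).map (Psum d) with hP
  have hlen : P.length = n + 1 := by simp [hP]
  have hget : ∀ i, i < n + 1 → P.getD i 0 = Psum d i := by
    intro i hi; exact getD_map_range _ _ _ hi
  have hx : P.getD (r + 1) 0 - mc = Psum d (r + 1) - mc := by rw [hget _ (by omega)]
  rw [hx]
  have hb : pvBisect P (Psum d (r + 1) - mc) P.length 0 P.length = Fdef d mc hm (r + 1) := by
    have hF := F_le d mc hm (r + 1)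
    apply bisect_eq P _ (Fdef d mc hm (r + 1))
    · rw [hget _ (by omega)]
      have := F_spec d mc hm (r + 1); linarith
    · intro i hi
      rw [hget _ (by omega)]
      have := F_min d mc hm (r + 1) hi; linarith
    · intro i j hij hj
      rw [hget _ (by omega), hget _ (by omega)]
      exact Psum_mono d hd hij
    · omega
    · omega
    · omega
    · omega
  rw [hb]

-- the two ports' distance sequences agree definitionally
theorem dist_eq (sl tl : List Char) :
    (fun i => compute_ascii_distance (sl.getD i ' ') (tl.getD i ' ')) = pvDistB sl tl := rfl

-- ===== VERDICT (by name: the statement is the Claim_ definition above) =====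
theorem num_eq_substr_spec : Claim_equal_num_eq_substr := by
  intro s t mc _ hpre
  unfold Spec_num_eq_substr
  dsimp only [num_eq_substr, num_eq_substr_alt]
  rcases hpre with ⟨_, hm | hs⟩
  · set sl := s.toList with hsl
    set tl := t.toList with htl
    have hd : ∀ i, 0 ≤ pvDistB sl tl i := fun i => abs_nonneg _
    rw [dist_eq sl tl, P_build sl tl, A_loop (pvDistB sl tl) hd mc hm sl.length,
      B_loop (pvDistB sl tl) hd mc hm sl.length]
  · subst hs
    rfl
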